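-- pv_equiv track=rewrite | github.com/Cyrus-Tan/IS111-AY20-21-TERM1-LT1 | Q2b.py | get_max_of_min
-- ===== SOURCE A (Python) =====
-- def get_max_of_min(list_of_num_tuples):
--     """function returns the maximum of the minimum values in these tuples."""
--     list_of_min_values = []              # Create empty list
--
--     for tuple_of_numbers in list_of_num_tuples:                       # iterate through each tuple in the list
--         list_of_numbers = list(tuple_of_numbers)                      # convert the tuple to list
--         tuple_minimum_value = list_of_numbers[0]                      # assign first element of the list to current minimum value
--         for number in list_of_numbers:                                                    # iterate through list of numbers
--             if number < tuple_minimum_value or number == tuple_minimum_value:             # compare number in the list with current tuple_minimum_value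
--                 tuple_minimum_value = number                                              # number will be current tuple_minimum_value if its smaller than previous
--         list_of_min_values.append(tuple_minimum_value)                                    # add each minimum value to the list
--
--     if len(list_of_min_values) == 0:                # if empty list, return None
--         return
--     elif len(list_of_min_values) > 0:               # only returns a value if list is not empty
--         max_value = list_of_min_values[0]           # let first number be max value among the final 3 numbers
--
--
-- ### METHOD 1: Compare items (integers) among a list to find max value  ( Not as good method because have to specify index)
--
-- #       for number in list_of_min_values:             # iterate through the list of min values
-- #           if list_of_min_values[1] > max_value:
-- #               max_value = list_of_min_values[1]     # will replace max value if second number > first number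
-- #           elif list_of_min_values[2] > max_value:
-- #               max_value = list_of_min_values[2]     # will replace max value if third number > second number
--
-- ### METHOD 2: Same as METHOD 1, but we replace list_of_min_values[1] with number ----> we don't need to use list indexing
--
--         for number in list_of_min_values:                # Diff between METHOD 2 AND 3: 2 loops through the elements of the list
--             if number > max_value:                       #                              while 3 loops through the index of the list
--                 max_value = number
--
--
-- ### METHOD 3: Compare items (integers) among a list to find max value ( BETTER Method because we don't need to specify index, will loop through length of the list)
--
-- #       for index in range(len(list_of_min_values)):      # loop through the length of the list
-- #           if list_of_min_values[index] > max_value:     # index here refers to current index we are looping through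
-- #               max_value = list_of_min_values[index]     # will
--
--         return max_value
-- ===== SOURCE B (Python) =====
-- def get_max_of_min(list_of_num_tuples):
--     """function returns the maximum of the minimum values in these tuples."""
--     return max((sorted(tuple_of_numbers)[0] for tuple_of_numbers in list_of_num_tuples),
--                default=None)
-- ===== Notes on version B (the rewrite author's own statement) =====
-- stated objective: idiomatic
-- what changed: Replaces the two hand-written scan loops with a library one-liner: each tuple's minimum is taken as sorted(t)[0] and the overall result is builtin max with default=None, so no explicit loop or intermediate list remains.
import Mathlib
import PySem

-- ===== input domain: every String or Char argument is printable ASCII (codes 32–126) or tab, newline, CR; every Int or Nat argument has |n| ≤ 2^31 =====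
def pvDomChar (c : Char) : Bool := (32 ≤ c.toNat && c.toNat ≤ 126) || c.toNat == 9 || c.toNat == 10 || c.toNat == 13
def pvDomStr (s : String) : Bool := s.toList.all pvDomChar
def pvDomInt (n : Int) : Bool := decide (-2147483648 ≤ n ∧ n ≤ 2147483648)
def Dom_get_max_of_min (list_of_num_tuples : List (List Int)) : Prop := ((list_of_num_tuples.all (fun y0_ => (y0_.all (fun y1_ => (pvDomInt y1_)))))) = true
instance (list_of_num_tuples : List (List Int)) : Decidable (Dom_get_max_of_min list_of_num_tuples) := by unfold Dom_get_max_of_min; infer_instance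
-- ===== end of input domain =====

-- B replaces A's two hand-written scan loops by a library one-liner: max (default=None) over
-- each tuple's sorted(t)[0]; objective: idiomatic.

-- ===== PORT A =====
-- inner loop of A: min seeded from t[0] (t nonempty by Pre_), condition 'n < m or n == m'
def pvMinA (t : List Int) : Int :=
  t.foldl (fun m n => if n < m ∨ n = m then n else m) ((PySem.List.pyGet? t 0).getD 0)

def get_max_of_min (list_of_num_tuples : List (List Int)) : Option Int :=
  let list_of_min_values :=
    list_of_num_tuples.foldl (fun acc t => acc ++ [pvMinA t]) []
  match list_of_min_values with
  | [] => none
  | m0 :: _ =>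
    some (list_of_min_values.foldl (fun mx n => if n > mx then n else mx) m0)

-- ===== PORT B =====
-- sorted(t)[0] : head of the (stably) sorted tuple; getD 0 only covers the IndexError case excluded by Pre_
def pvSortedHead (t : List Int) : Int :=
  (PySem.List.pyGet? (PySem.List.sorted t (fun x => x) false) 0).getD 0

def get_max_of_min_alt (list_of_num_tuples : List (List Int)) : Option Int :=
  PySem.List.max? (list_of_num_tuples.map pvSortedHead) (fun x => x)

-- ===== PRECONDITION & SPEC =====
-- Pre_ excludes lists containing an empty inner list: tuple_of_numbers[0] in A (and sorted(t)[0] in B) raises IndexError there.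
def Pre_get_max_of_min (list_of_num_tuples : List (List Int)) : Prop :=
  ∀ t ∈ list_of_num_tuples, t ≠ []
instance (list_of_num_tuples : List (List Int)) : Decidable (Pre_get_max_of_min list_of_num_tuples) := by unfold Pre_get_max_of_min; infer_instance

def pvWitness_get_max_of_min : List (List Int) := [[3, 1], [2], [5, -4, 7]]

def Spec_get_max_of_min (list_of_num_tuples : List (List Int)) (out : Option Int) : Prop := out = get_max_of_min_alt list_of_num_tuples
instance (list_of_num_tuples : List (List Int)) (out : Option Int) : Decidable (Spec_get_max_of_min list_of_num_tuples out) := by unfold Spec_get_max_of_min; infer_instance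

-- ===== CLAIM (what is proved, stated in full; the proofs are below) =====
def Claim_equal_get_max_of_min : Prop := ∀ (list_of_num_tuples : List (List Int)), Dom_get_max_of_min list_of_num_tuples → Pre_get_max_of_min list_of_num_tuples → Spec_get_max_of_min list_of_num_tuples (get_max_of_min list_of_num_tuples)

-- ===== LEMMAS AND PROOFS =====

-- A's inner loop computes the list minimum: its update 'n < m or n == m' is just 'min'
theorem pvMinA_cons (h : Int) (tl : List Int) :
    pvMinA (h :: tl) = tl.foldl min h := by
  unfold pvMinA
  rw [PySem.List.pyGet?_zero_cons]
  simp only [Option.getD_some, List.foldl_cons]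
  have e : (fun (m n : Int) => if n < m ∨ n = m then n else m) = min := by
    funext m n
    by_cases hle : n ≤ m
    · rcases lt_or_eq_of_le hle with hlt | heq
      · simp [hlt, min_eq_right (le_of_lt hlt)]
      · simp [heq]
    · push Not at hle
      have : ¬ (n < m ∨ n = m) := by
        rintro (h1 | h1) <;> omega
      simp [this, min_eq_left (le_of_lt hle)]
  rw [e]
  simp

-- sorted(t)[0] is that same minimum (head of the sorted list = least element)
theorem pvSortedHead_eq_pvMinA (t : List Int) (ht : t ≠ []) :
    pvSortedHead t = pvMinA t := by
  obtain ⟨h, tl, rfl⟩ := List.exists_cons_of_ne_nil ht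
  rw [pvMinA_cons]
  unfold pvSortedHead
  have hs : PySem.List.sorted (h :: tl) (fun x => x) false ≠ [] := by
    intro hc
    rw [PySem.List.sorted_eq_nil_iff] at hc
    exact (List.cons_ne_nil h tl) hc
  obtain ⟨s0, stl, hseq⟩ := List.exists_cons_of_ne_nil hs
  rw [hseq, PySem.List.pyGet?_zero_cons, Option.getD_some]
  -- s0 ≤ every element, s0 ∈ the list
  have hle : ∀ y ∈ (h :: tl), s0 ≤ y := PySem.List.key_head_sorted_le _ _ hseq
  have hmem : s0 ∈ (h :: tl) := by
    have := (PySem.List.sorted_perm (h :: tl) (fun x => x) false).mem_iff.mp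
      (by rw [hseq]; exact List.mem_cons_self)
    exact this
  -- foldl min ≤ everything and is a member; antisymmetry
  have hf := PySem.List.foldl_min_le tl h
  have hfm := PySem.List.foldl_min_mem tl h
  have h1 : s0 ≤ tl.foldl min h := by
    rcases hfm with hfa | hfb
    · rw [hfa]; exact hle h List.mem_cons_self
    · exact hle _ (List.mem_cons_of_mem h hfb)
  have h2 : tl.foldl min h ≤ s0 := by
    rcases List.mem_cons.mp hmem with rfl | hmem'
    · exact hf.1
    · exact hf.2 s0 hmem'
  omega

-- A's outer loop is a running max, i.e. foldl max
theorem gfun_eq_max : (fun (mx n : Int) => if n > mx then n else mx) = max := by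
  funext mx n
  by_cases h : n > mx
  · simp [h, max_eq_right (le_of_lt h)]
  · simp [h]
    omega

theorem get_max_of_min_spec : Claim_equal_get_max_of_min := by
  intro l _ hpre
  unfold Spec_get_max_of_min get_max_of_min get_max_of_min_alt
  simp only [List.nil_append, PySem.List.foldl_append_singleton_eq_map]
  have hmap : l.map pvSortedHead = l.map pvMinA :=
    List.map_congr_left (fun t ht => pvSortedHead_eq_pvMinA t (hpre t ht))
  rw [hmap]
  cases hml : l.map pvMinA with
  | nil => simp [PySem.List.max?]
  | cons m0 ms =>
    rw [PySem.List.max?_id_cons]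
    simp only [gfun_eq_max, List.foldl_cons, max_self]
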